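-- pv_equiv track=rewrite | github.com/vit-aborigen/CIO_woplugin | Berserk Rook.py | return_possible_moves
-- ===== SOURCE A (Python) =====
-- def return_possible_moves(position, figures_left):
--     neighbours = []
--
--     # finding row neighbours
--     moves_with_jumping = sorted([cell for cell in figures_left if (cell.endswith(position[1]))] + [position])
--     idx = moves_with_jumping.index(position)
--     if idx - 1 >= 0:
--         neighbours.append(moves_with_jumping[idx-1])
--     if idx + 1 < len(moves_with_jumping):
--         neighbours.append(moves_with_jumping[idx + 1])
--
--     # finding column neighbours
--     moves_with_jumping = sorted([move for move in figures_left if (move.startswith(position[0]))] + [position],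
--                                 key=lambda x: x[1])
--     idx = moves_with_jumping.index(position)
--     if idx - 1 >= 0:
--         neighbours.append(moves_with_jumping[idx - 1])
--     if idx + 1 < len(moves_with_jumping):
--         neighbours.append(moves_with_jumping[idx + 1])
--
--     return neighbours
-- ===== SOURCE B (Python) =====
-- def return_possible_moves(position, figures_left):
--     file, rank = position[0], position[1]
--     row_below = row_above = None   # nearest occupied cell on the rank, below / above in string order
--     col_below = col_above = None   # nearest occupied cell on the file, below / above by rank char
--     for cell in figures_left:
--         if cell.endswith(rank):
--             if cell < position:
--                 if row_below is None or row_below < cell: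
--                     row_below = cell
--             elif cell > position:
--                 if row_above is None or cell < row_above:
--                     row_above = cell
--         if cell.startswith(file):
--             k = cell[1]
--             if k < rank:
--                 if col_below is None or col_below[1] <= k:
--                     col_below = cell
--             elif k > rank:
--                 if col_above is None or k < col_above[1]:
--                     col_above = cell
--     return [c for c in (row_below, row_above, col_below, col_above) if c is not None]
-- ===== Notes on version B (the rewrite author's own statement) =====
-- stated objective: alternative
-- what changed: Replaces the two sort-then-index passes by one linear scan tracking the nearest smaller and larger occupied cell per row/column; Pre_ excludes inputs where A raises IndexError (position or a same-file figure shorter than 2 chars) and inputs with a figure occupying the rook's own square (a cell equal to position, or on the same file with the same rank char), where A's answer is an accident of stable-sort tie order among equal sort keys.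
-- outside the precondition, e.g. on return_possible_moves('a1', ['a1']): A returns ['a1', 'a1'], B returns []; on return_possible_moves('a1', ['a1x']): A returns ['a1x'], B returns []
import Mathlib
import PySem

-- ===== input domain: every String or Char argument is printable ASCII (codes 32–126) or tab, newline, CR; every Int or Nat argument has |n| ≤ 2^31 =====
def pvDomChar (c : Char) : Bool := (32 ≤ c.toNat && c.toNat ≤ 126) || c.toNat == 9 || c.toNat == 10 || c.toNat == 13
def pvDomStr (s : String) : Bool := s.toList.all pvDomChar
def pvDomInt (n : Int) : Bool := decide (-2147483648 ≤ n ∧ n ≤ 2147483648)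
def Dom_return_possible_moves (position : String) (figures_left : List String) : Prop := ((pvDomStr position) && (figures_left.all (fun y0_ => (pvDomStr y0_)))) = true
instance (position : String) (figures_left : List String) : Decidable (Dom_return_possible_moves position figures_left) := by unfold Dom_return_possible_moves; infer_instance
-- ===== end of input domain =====

-- B replaces A's two sort-then-index passes by one linear scan tracking the nearest
-- smaller/larger occupied cell per row/column filter (objective: alternative algorithm).

-- ===== PORT A =====
def return_possible_moves (position : String) (figures_left : List String) : List String :=
  match position.toList with
  | f :: r :: _ =>
      -- row neighbours
      let mwj1 := PySem.List.sorted
        ((figures_left.filter (fun cell => PySem.Chars.endswith cell.toList [r])) ++ [position])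
        (fun x => x.toList)
      let idx1 : Int := ((PySem.List.index? mwj1 position).getD 0 : Nat)
      let n1 : List String :=
        (if 0 ≤ idx1 - 1 then [(PySem.List.pyGet? mwj1 (idx1 - 1)).getD ""] else []) ++
        (if idx1 + 1 < (mwj1.length : Int) then [(PySem.List.pyGet? mwj1 (idx1 + 1)).getD ""] else [])
      -- column neighbours
      let mwj2 := PySem.List.sorted
        ((figures_left.filter (fun mv => PySem.Chars.startswith mv.toList [f])) ++ [position])
        (fun x => (PySem.Str.pyGet? x 1).getD ' ')
      let idx2 : Int := ((PySem.List.index? mwj2 position).getD 0 : Nat)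
      let n2 : List String :=
        (if 0 ≤ idx2 - 1 then [(PySem.List.pyGet? mwj2 (idx2 - 1)).getD ""] else []) ++
        (if idx2 + 1 < (mwj2.length : Int) then [(PySem.List.pyGet? mwj2 (idx2 + 1)).getD ""] else [])
      n1 ++ n2
  | _ => []    -- position[1] raises IndexError (outside Pre_)

-- ===== PORT B =====
-- cell[1], the rank character of a cell (exists wherever B reads it, by Pre_)
def pvKey1 (x : String) : Char := (PySem.Str.pyGet? x 1).getD ' '

-- row accumulator step: (row_below, row_above)
def pvStepRow (p : String) (r : Char) (s : Option String × Option String) (cell : String) :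
    Option String × Option String :=
  if PySem.Chars.endswith cell.toList [r] then
    if cell.toList < p.toList then
      ((if (match s.1 with | none => true | some m => decide (m.toList < cell.toList))
        then some cell else s.1), s.2)
    else if p.toList < cell.toList then
      (s.1, (if (match s.2 with | none => true | some m => decide (cell.toList < m.toList))
             then some cell else s.2))
    else s
  else s

-- column accumulator step: (col_below, col_above)
def pvStepCol (f r : Char) (s : Option String × Option String) (cell : String) :
    Option String × Option String :=
  if PySem.Chars.startswith cell.toList [f] then
    if pvKey1 cell < r then
      ((if (match s.1 with | none => true | some m => decide (pvKey1 m ≤ pvKey1 cell))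
        then some cell else s.1), s.2)
    else if r < pvKey1 cell then
      (s.1, (if (match s.2 with | none => true | some m => decide (pvKey1 cell < pvKey1 m))
             then some cell else s.2))
    else s
  else s

def return_possible_moves_alt (position : String) (figures_left : List String) : List String :=
  match position.toList with
  | [] => []    -- position[0] raises IndexError (outside Pre_)
  | [_] => []   -- position[1] raises IndexError (outside Pre_)
  | f :: r :: _ =>
      let st := figures_left.foldl
        (fun (s : (Option String × Option String) × (Option String × Option String)) cell =>
          (pvStepRow position r s.1 cell, pvStepCol f r s.2 cell))
        ((none, none), (none, none))
      st.1.1.toList ++ st.1.2.toList ++ st.2.1.toList ++ st.2.2.toList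

-- ===== PRECONDITION & SPEC =====
-- Pre_ excludes the inputs where Python A raises IndexError (a position shorter than 2
-- characters, or a figure starting with position[0] but shorter than 2 characters), and
-- inputs with a figure occupying the rook's own square (a cell equal to position, or on
-- the same file with the same rank character), where A's answer is an accident of
-- stable-sort tie order among equal sort keys.
def Pre_return_possible_moves (position : String) (figures_left : List String) : Prop :=
  2 ≤ position.toList.length ∧
  ∀ cell ∈ figures_left, cell ≠ position ∧
    (PySem.Chars.startswith cell.toList (position.toList.take 1) = true →
      2 ≤ cell.toList.length ∧ pvKey1 cell ≠ pvKey1 position)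
instance (position : String) (figures_left : List String) :
    Decidable (Pre_return_possible_moves position figures_left) := by
  unfold Pre_return_possible_moves; infer_instance

def pvWitness_return_possible_moves : String × List String := ("a1", ["a2", "b1"])

def Spec_return_possible_moves (position : String) (figures_left : List String) (out : List String) : Prop :=
  out = return_possible_moves_alt position figures_left
instance (position : String) (figures_left : List String) (out : List String) :
    Decidable (Spec_return_possible_moves position figures_left out) := by
  unfold Spec_return_possible_moves; infer_instance

-- ===== CLAIM (what is proved, stated in full; the proofs are below) =====
def Claim_equal_return_possible_moves : Prop :=
  ∀ (position : String) (figures_left : List String),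
    Dom_return_possible_moves position figures_left →
    Pre_return_possible_moves position figures_left →
    Spec_return_possible_moves position figures_left (return_possible_moves position figures_left)

-- ===== LEMMAS AND PROOFS =====

-- generic form of B's scan step (both row and column instantiate it; proof-only helper)
def pvScan (isLt isGt : String → Bool) (upLt upGt : String → String → Bool)
    (s : Option String × Option String) (cell : String) :
    Option String × Option String :=
  if isLt cell then
    ((if (match s.1 with | none => true | some m => upLt m cell) then some cell else s.1), s.2)
  else if isGt cell then
    (s.1, (if (match s.2 with | none => true | some m => upGt m cell) then some cell else s.2))
  else s

theorem pvStepRow_eq (p : String) (r : Char) (s : Option String × Option String) (c : String) :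
    pvStepRow p r s c =
      if PySem.Chars.endswith c.toList [r]
      then pvScan (fun x => decide (x.toList < p.toList)) (fun x => decide (p.toList < x.toList))
             (fun m x => decide (m.toList < x.toList)) (fun m x => decide (x.toList < m.toList)) s c
      else s := by
  obtain ⟨a, b⟩ := s
  unfold pvStepRow pvScan
  by_cases he : PySem.Chars.endswith c.toList [r] = true
  · by_cases h1 : c.toList < p.toList
    · simp [he, h1]
    · by_cases h2 : p.toList < c.toList <;> simp [he, h1, h2]
  · simp [he]

theorem pvStepCol_eq (f r : Char) (s : Option String × Option String) (c : String) :
    pvStepCol f r s c =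
      if PySem.Chars.startswith c.toList [f]
      then pvScan (fun x => decide (pvKey1 x < r)) (fun x => decide (r < pvKey1 x))
             (fun m x => decide (pvKey1 m ≤ pvKey1 x)) (fun m x => decide (pvKey1 x < pvKey1 m)) s c
      else s := by
  obtain ⟨a, b⟩ := s
  unfold pvStepCol pvScan
  by_cases he : PySem.Chars.startswith c.toList [f] = true
  · by_cases h1 : pvKey1 c < r
    · simp [he, h1]
    · by_cases h2 : r < pvKey1 c <;> simp [he, h1, h2]
  · simp [he]

-- basic insertBy facts
theorem pv_insertBy_nil {α : Type} (before : α → α → Bool) (x : α) :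
    PySem.List.insertBy before x [] = [x] := rfl

theorem pv_insertBy_cons {α : Type} (before : α → α → Bool) (x y : α) (ys : List α) :
    PySem.List.insertBy before x (y :: ys) =
      if before x y then x :: y :: ys else y :: PySem.List.insertBy before x ys := rfl

theorem pv_insertBy_ne_nil {α : Type} (before : α → α → Bool) (x : α) (ys : List α) :
    PySem.List.insertBy before x ys ≠ [] := by
  cases ys with
  | nil => simp [pv_insertBy_nil]
  | cons y t =>
      rw [pv_insertBy_cons]; split_ifs <;> simp

theorem pv_insertBy_append_not {α : Type} (before : α → α → Bool) (x : α)
    (A B : List α) (h : ∀ a ∈ A, before x a = false) :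
    PySem.List.insertBy before x (A ++ B) = A ++ PySem.List.insertBy before x B := by
  induction A with
  | nil => simp
  | cons a t ih =>
      have ha := h a (by simp)
      simp only [List.cons_append, pv_insertBy_cons, ha]
      simp [ih (fun b hb => h b (by simp [hb]))]

theorem pv_insertBy_append_mem {α : Type} (before : α → α → Bool) (x : α)
    (A B : List α) (h : ∃ a ∈ A, before x a = true) :
    PySem.List.insertBy before x (A ++ B) = PySem.List.insertBy before x A ++ B := by
  induction A with
  | nil => simp at h
  | cons a t ih =>
      by_cases ha : before x a = true
      · simp [pv_insertBy_cons, ha]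
      · obtain ⟨b, hb, hbt⟩ := h
        rcases List.mem_cons.1 hb with hb | hb
        · exact absurd (hb ▸ hbt) ha
        · simp only [List.cons_append, pv_insertBy_cons, ha]
          simp [ih ⟨b, hb, hbt⟩]

theorem pv_getLast?_insertBy_of_mem {α : Type} (before : α → α → Bool) (x : α)
    (A : List α) (h : ∃ a ∈ A, before x a = true) :
    (PySem.List.insertBy before x A).getLast? = A.getLast? := by
  induction A with
  | nil => simp at h
  | cons a t ih =>
      by_cases ha : before x a = true
      · rw [pv_insertBy_cons, if_pos ha]
        cases t <;> simp [List.getLast?_cons_cons]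
      · have hx : ∃ b ∈ t, before x b = true := by
          obtain ⟨b, hb, hbt⟩ := h
          rcases List.mem_cons.1 hb with hb | hb
          · exact absurd (hb ▸ hbt) ha
          · exact ⟨b, hb, hbt⟩
        rw [pv_insertBy_cons, if_neg (by simp [ha])]
        obtain ⟨c, u, hcu⟩ := List.exists_cons_of_ne_nil (pv_insertBy_ne_nil before x t)
        cases t with
        | nil => simp at hx
        | cons b u' =>
            rw [hcu, List.getLast?_cons_cons, ← hcu, ih hx, List.getLast?_cons_cons]

theorem pv_pairwise_insertBy {α κ : Type} [LinearOrder κ] (k : α → κ) (x : α) (L : List α)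
    (h : L.Pairwise (fun a b => k a ≤ k b)) :
    (PySem.List.insertBy (fun a b => decide (k a < k b)) x L).Pairwise
      (fun a b => k a ≤ k b) := by
  induction L with
  | nil => simp [pv_insertBy_nil]
  | cons y t ih =>
      rw [List.pairwise_cons] at h
      rw [pv_insertBy_cons]
      split_ifs with hxy
      · rw [decide_eq_true_iff] at hxy
        refine List.pairwise_cons.2 ⟨?_, List.pairwise_cons.2 ⟨h.1, h.2⟩⟩
        intro z hz
        rcases List.mem_cons.1 hz with hz | hz
        · rw [hz]; exact le_of_lt hxy
        · exact le_trans (le_of_lt hxy) (h.1 z hz)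
      · rw [decide_eq_true_iff] at hxy
        refine List.pairwise_cons.2 ⟨?_, ih h.2⟩
        intro z hz
        rcases (PySem.List.mem_insertBy _ x z t).1 hz with hz | hz
        · rw [hz]; exact le_of_not_gt hxy
        · exact h.1 z hz

theorem pv_key_le_getLast {α κ : Type} [LinearOrder κ] (k : α → κ) (L : List α) (m : α)
    (h : L.Pairwise (fun a b => k a ≤ k b)) (hm : L.getLast? = some m) :
    ∀ a ∈ L, k a ≤ k m := by
  intro a ha
  rcases eq_or_ne a m with rfl | hne
  · exact le_refl _
  · have := List.getLast?_eq_some_iff.1 hm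
    obtain ⟨l', rfl⟩ := this
    rcases List.mem_append.1 ha with ha | ha
    · exact List.pairwise_append.1 h |>.2.2 a ha m (by simp)
    · simp at ha; exact absurd ha hne

theorem pv_insertBy_front {α : Type} (before : α → α → Bool) (x : α) (L : List α)
    (h : ∀ y, L.head? = some y → before x y = true) :
    PySem.List.insertBy before x L = x :: L := by
  cases L with
  | nil => rfl
  | cons y t => rw [pv_insertBy_cons, if_pos (h y rfl)]

-- invariant of B's scan over the sorted (so far) list A maintains
def InvK {κ : Type} [LinearOrder κ] (k : String → κ) (kp : κ) (L : List String)
    (lt gt : Option String) : Prop :=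
  ∃ L1 L3, L = L1 ++ L3 ∧
    (∀ x ∈ L1, k x < kp) ∧ (∀ x ∈ L3, kp < k x) ∧
    L1.Pairwise (fun a b => k a ≤ k b) ∧ L3.Pairwise (fun a b => k a ≤ k b) ∧
    lt = L1.getLast? ∧ gt = L3.head?

theorem pvScan_preserve {κ : Type} [LinearOrder κ] (k : String → κ) (kp : κ)
    (isLt isGt : String → Bool) (upLt upGt : String → String → Bool)
    (bef : String → String → Bool)
    (hisLt : isLt = fun x => decide (k x < kp))
    (hisGt : isGt = fun x => decide (kp < k x))
    (hupGt : upGt = fun m x => decide (k x < k m))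
    (hbef : bef = fun a b => decide (k a < k b))
    (hfalse : ∀ m c, k c < k m → upLt m c = false)
    (hbest : ∀ m c, k m ≤ k c → (if upLt m c = true then some c else some m) = some c)
    (L : List String) (s : Option String × Option String) (c : String)
    (hc : k c ≠ kp) (h : InvK k kp L s.1 s.2) :
    InvK k kp (PySem.List.insertBy bef c L)
      (pvScan isLt isGt upLt upGt s c).1 (pvScan isLt isGt upLt upGt s c).2 := by
  subst hisLt; subst hisGt; subst hupGt; subst hbef
  obtain ⟨lt, gt⟩ := s
  obtain ⟨L1, L3, hL, h1, h3, hp1, hp3, hlt, hgt⟩ := h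
  dsimp only at hlt hgt
  subst hlt; subst hgt; subst hL
  by_cases hlo : k c < kp
  · -- cell goes into the below region
    have hl : (fun x => decide (k x < kp)) c = true := by simpa using hlo
    by_cases hex : ∃ a ∈ L1, k c < k a
    · -- strictly inside L1 : running best unchanged
      have hmem : ∃ a ∈ L1, decide (k c < k a) = true := by
        obtain ⟨a, ha, hca⟩ := hex; exact ⟨a, ha, by simpa using hca⟩
      have hgl := pv_getLast?_insertBy_of_mem (fun a b => decide (k a < k b)) c L1 hmem
      have hins : PySem.List.insertBy (fun a b => decide (k a < k b)) c (L1 ++ L3)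
          = PySem.List.insertBy (fun a b => decide (k a < k b)) c L1 ++ L3 :=
        pv_insertBy_append_mem (fun a b => decide (k a < k b)) c L1 L3 hmem
      obtain ⟨a, haL, hca⟩ := hex
      have hne : L1 ≠ [] := fun hnil => by simp [hnil] at haL
      obtain ⟨m, hm⟩ : ∃ m, L1.getLast? = some m := by
        cases hml : L1.getLast? with
        | none => exact absurd (List.getLast?_eq_none_iff.1 hml) hne
        | some m => exact ⟨m, rfl⟩
      have hcm : k c < k m :=
        lt_of_lt_of_le hca (pv_key_le_getLast k L1 m hp1 hm a haL)
      have hstep : pvScan (fun x => decide (k x < kp)) (fun x => decide (kp < k x))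
          upLt (fun m x => decide (k x < k m)) (L1.getLast?, L3.head?) c
          = (L1.getLast?, L3.head?) := by
        simp only [pvScan]
        rw [if_pos hl, hm]
        simp [hfalse m c hcm]
      rw [hstep]
      refine ⟨PySem.List.insertBy (fun a b => decide (k a < k b)) c L1, L3,
        hins, fun x hx => ?_, h3, pv_pairwise_insertBy k c L1 hp1, hp3, hgl.symm, rfl⟩
      rcases (PySem.List.mem_insertBy _ c x L1).1 hx with rfl | hx
      · exact hlo
      · exact h1 x hx
    · -- at the end of L1 : running best becomes c
      push_neg at hex
      have hnot : ∀ a ∈ L1, decide (k c < k a) = false := by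
        intro a ha; simpa using not_lt.mpr (hex a ha)
      have hfront : ∀ y, L3.head? = some y → decide (k c < k y) = true := by
        intro y hy
        simpa using lt_trans hlo (h3 y (List.mem_of_mem_head? hy))
      have hins : PySem.List.insertBy (fun a b => decide (k a < k b)) c (L1 ++ L3)
          = (L1 ++ [c]) ++ L3 := by
        rw [pv_insertBy_append_not (fun a b => decide (k a < k b)) c L1 L3 hnot,
          pv_insertBy_front _ _ _ hfront]
        simp
      have hnew : (if (match L1.getLast? with | none => true | some m => upLt m c) = true
                   then some c else L1.getLast?) = some c := by
        cases hml : L1.getLast? with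
        | none => simp
        | some m =>
            have hmmem : m ∈ L1 := by
              obtain ⟨ys, hys⟩ := List.getLast?_eq_some_iff.1 hml
              simp [hys]
            exact hbest m c (hex m hmmem)
      have hstep : pvScan (fun x => decide (k x < kp)) (fun x => decide (kp < k x))
          upLt (fun m x => decide (k x < k m)) (L1.getLast?, L3.head?) c
          = (some c, L3.head?) := by
        simp only [pvScan]
        rw [if_pos hl, hnew]
      rw [hstep]
      refine ⟨L1 ++ [c], L3, hins, fun x hx => ?_, h3, ?_, hp3, by simp, rfl⟩
      · rcases List.mem_append.1 hx with hx | hx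
        · exact h1 x hx
        · simp at hx; rw [hx]; exact hlo
      · refine List.pairwise_append.2 ⟨hp1, by simp, ?_⟩
        intro a ha b hb
        simp at hb; subst hb
        exact hex a ha
  · -- cell goes into the above region
    have hhi : kp < k c := lt_of_le_of_ne (not_lt.1 hlo) (Ne.symm hc)
    have hnl : ¬ ((fun x => decide (k x < kp)) c = true) := by simpa using hlo
    have hg : (fun x => decide (kp < k x)) c = true := by simpa using hhi
    have hnot : ∀ a ∈ L1, decide (k c < k a) = false := by
      intro a ha; simpa using not_lt_of_gt (lt_trans (h1 a ha) hhi)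
    have hins : PySem.List.insertBy (fun a b => decide (k a < k b)) c (L1 ++ L3)
        = L1 ++ PySem.List.insertBy (fun a b => decide (k a < k b)) c L3 :=
      pv_insertBy_append_not (fun a b => decide (k a < k b)) c L1 L3 hnot
    have hstep : pvScan (fun x => decide (k x < kp)) (fun x => decide (kp < k x))
        upLt (fun m x => decide (k x < k m)) (L1.getLast?, L3.head?) c
        = (L1.getLast?,
           (PySem.List.insertBy (fun a b => decide (k a < k b)) c L3).head?) := by
      simp only [pvScan]
      rw [if_neg hnl, if_pos hg]
      cases L3 with
      | nil => simp [pv_insertBy_nil]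
      | cons hh t =>
          rw [pv_insertBy_cons]
          by_cases hch : k c < k hh
          · simp [hch]
          · simp [hch]
    rw [hstep]
    refine ⟨L1, PySem.List.insertBy (fun a b => decide (k a < k b)) c L3,
      hins, h1, fun x hx => ?_, hp1, pv_pairwise_insertBy k c L3 hp3, rfl, rfl⟩
    rcases (PySem.List.mem_insertBy _ c x L3).1 hx with rfl | hx
    · exact hhi
    · exact h3 x hx

theorem pvScan_fold {κ : Type} [LinearOrder κ] (k : String → κ) (kp : κ)
    (isLt isGt : String → Bool) (upLt upGt : String → String → Bool)
    (bef : String → String → Bool) (g : String → Bool)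
    (hisLt : isLt = fun x => decide (k x < kp))
    (hisGt : isGt = fun x => decide (kp < k x))
    (hupGt : upGt = fun m x => decide (k x < k m))
    (hbef : bef = fun a b => decide (k a < k b))
    (hfalse : ∀ m c, k c < k m → upLt m c = false)
    (hbest : ∀ m c, k m ≤ k c → (if upLt m c = true then some c else some m) = some c) :
    ∀ (figs : List String) (L : List String) (s : Option String × Option String),
    (∀ c ∈ figs, g c = true → k c ≠ kp) → InvK k kp L s.1 s.2 →
    InvK k kp
      (figs.foldl (fun acc x => if g x then PySem.List.insertBy bef x acc else acc) L)
      (figs.foldl (fun s x => if g x then pvScan isLt isGt upLt upGt s x else s) s).1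
      (figs.foldl (fun s x => if g x then pvScan isLt isGt upLt upGt s x else s) s).2 := by
  intro figs
  induction figs with
  | nil => intro L s _ h; simpa using h
  | cons c t ih =>
      intro L s hg h
      simp only [List.foldl_cons]
      by_cases hgc : g c = true
      · rw [if_pos hgc, if_pos hgc]
        exact ih _ _ (fun x hx => hg x (by simp [hx]))
          (pvScan_preserve k kp isLt isGt upLt upGt bef hisLt hisGt hupGt hbef
            hfalse hbest L s c (hg c (by simp) hgc) h)
      · rw [if_neg hgc, if_neg hgc]
        exact ih _ _ (fun x hx => hg x (by simp [hx])) h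

theorem pv_index_val (p : String) (P S : List String) (hpP : p ∉ P) :
    PySem.List.index? (P ++ p :: S) p = some P.length :=
  (PySem.List.index?_eq_some_iff _ _ _).2 ⟨P, S, rfl, rfl, hpP⟩

theorem pv_chunk_eval (p : String) (P S : List String) :
    ((if 0 ≤ (P.length : Int) - 1
      then [(PySem.List.pyGet? (P ++ p :: S) ((P.length : Int) - 1)).getD ""] else []) ++
     (if (P.length : Int) + 1 < ((P ++ p :: S).length : Int)
      then [(PySem.List.pyGet? (P ++ p :: S) ((P.length : Int) + 1)).getD ""] else []))
    = P.getLast?.toList ++ S.head?.toList := by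
  congr 1
  · -- predecessor chunk
    cases P with
    | nil => simp
    | cons a t =>
        rw [if_pos (by push_cast [List.length_cons]; omega)]
        have hcast : ((a :: t).length : Int) - 1 = ((t.length : Nat) : Int) := by
          push_cast [List.length_cons]; ring
        rw [hcast, PySem.List.pyGet?_natCast,
          List.getElem?_append_left (by simp)]
        have : (a :: t).getLast? = (a :: t)[t.length]? := by
          rw [List.getLast?_eq_getElem?]; simp
        rw [← this]
        cases hm : (a :: t).getLast? with
        | none => simp at hm
        | some m => simp
  · -- successor chunk
    cases S with
    | nil => rw [if_neg (by simp)]; simp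
    | cons y t =>
        rw [if_pos (by simp)]
        have hcast : ((P.length : Nat) : Int) + 1 = (((P.length + 1 : Nat)) : Int) := by push_cast; ring
        rw [hcast, PySem.List.pyGet?_natCast,
          List.getElem?_append_right (by omega)]
        simp

theorem pvScan_extract {κ : Type} [LinearOrder κ] (k : String → κ) (kp : κ)
    (bef : String → String → Bool) (hbef : bef = fun a b => decide (k a < k b))
    (p : String) (hp : k p = kp) (L : List String) (lt gt : Option String)
    (h : InvK k kp L lt gt) :
    ∃ P S, PySem.List.insertBy bef p L = P ++ p :: S ∧
      p ∉ P ∧ P.getLast? = lt ∧ S.head? = gt := by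
  subst hbef
  obtain ⟨L1, L3, hL, h1, h3, _, _, hlt, hgt⟩ := h
  have hnot : ∀ a ∈ L1, decide (k p < k a) = false := by
    intro a ha; rw [hp]; simpa using not_lt_of_gt (h1 a ha)
  have hfront : ∀ y, L3.head? = some y → decide (k p < k y) = true := by
    intro y hy; rw [hp]; simpa using h3 y (List.mem_of_mem_head? hy)
  refine ⟨L1, L3, ?_, fun hmem => lt_irrefl kp (hp ▸ h1 p hmem), hlt.symm, hgt.symm⟩
  rw [hL, pv_insertBy_append_not (fun a b => decide (k a < k b)) p L1 L3 hnot,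
    pv_insertBy_front _ _ _ hfront]

-- ===== VERDICT (by name: the statement is the Claim_ definition above) =====
theorem return_possible_moves_spec : Claim_equal_return_possible_moves := by
  intro position figures_left _hdom hpre
  obtain ⟨hlen, hcells⟩ := hpre
  show return_possible_moves position figures_left
      = return_possible_moves_alt position figures_left
  cases hP : position.toList with
  | nil => rw [hP] at hlen; simp at hlen
  | cons f rest =>
    cases rest with
    | nil => rw [hP] at hlen; simp at hlen
    | cons r rest2 =>
      have hk : pvKey1 position = r := by
        simp [pvKey1, hP]
      -- row: no figure's full string equals position's string
      have hgR : ∀ c ∈ figures_left,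
          PySem.Chars.endswith c.toList [r] = true → c.toList ≠ position.toList := by
        intro c hc _ he
        exact (hcells c hc).1 (String.toList_inj.mp he)
      -- column: no same-file figure has position's rank char
      have hgC : ∀ c ∈ figures_left,
          PySem.Chars.startswith c.toList [f] = true → pvKey1 c ≠ r := by
        intro c hc hs
        rw [← hk]
        exact ((hcells c hc).2 (by rw [hP]; simpa using hs)).2
      have hinvR := pvScan_fold String.toList position.toList
        (fun x => decide (x.toList < position.toList)) (fun x => decide (position.toList < x.toList))
        (fun m x => decide (m.toList < x.toList)) (fun m x => decide (x.toList < m.toList))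
        (fun a b => decide (a.toList < b.toList))
        (fun c => PySem.Chars.endswith c.toList [r])
        (funext fun x => decide_eq_decide.2 Iff.rfl)
        (funext fun x => decide_eq_decide.2 Iff.rfl)
        (funext fun m => funext fun x => decide_eq_decide.2 Iff.rfl)
        (funext fun a => funext fun b => decide_eq_decide.2 Iff.rfl)
        (fun m c h => by simp only [decide_eq_false_iff_not]; exact not_lt_of_gt h)
        (fun m c h => by
          by_cases hm : m.toList < c.toList
          · have ht : decide (m.toList < c.toList) = true := decide_eq_true hm
            simp [ht]
          · have hmc : m = c := String.toList_inj.mp (le_antisymm h (not_lt.1 hm))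
            rw [hmc]; simp)
        figures_left [] (none, none) hgR
        ⟨[], [], rfl, by simp, by simp, by simp, by simp, rfl, rfl⟩
      obtain ⟨P1, S1, hMr, hpP1, hLast1, hHead1⟩ :=
        pvScan_extract String.toList position.toList
          (fun a b => decide (a.toList < b.toList))
          (funext fun a => funext fun b => decide_eq_decide.2 Iff.rfl)
          position rfl _ _ _ hinvR
      beta_reduce at hLast1 hHead1
      have hinvC := pvScan_fold pvKey1 r
        (fun x => decide (pvKey1 x < r)) (fun x => decide (r < pvKey1 x))
        (fun m x => decide (pvKey1 m ≤ pvKey1 x)) (fun m x => decide (pvKey1 x < pvKey1 m))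
        (fun a b => decide (pvKey1 a < pvKey1 b))
        (fun c => PySem.Chars.startswith c.toList [f])
        (funext fun x => decide_eq_decide.2 Iff.rfl)
        (funext fun x => decide_eq_decide.2 Iff.rfl)
        (funext fun m => funext fun x => decide_eq_decide.2 Iff.rfl)
        (funext fun a => funext fun b => decide_eq_decide.2 Iff.rfl)
        (fun m c h => by simp only [decide_eq_false_iff_not]; exact not_le_of_gt h)
        (fun m c h => by
          have ht : decide (pvKey1 m ≤ pvKey1 c) = true := decide_eq_true h
          simp [ht])
        figures_left [] (none, none) hgC
        ⟨[], [], rfl, by simp, by simp, by simp, by simp, rfl, rfl⟩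
      obtain ⟨P2, S2, hMc, hpP2, hLast2, hHead2⟩ :=
        pvScan_extract pvKey1 r
          (fun a b => decide (pvKey1 a < pvKey1 b))
          (funext fun a => funext fun b => decide_eq_decide.2 Iff.rfl)
          position hk _ _ _ hinvC
      beta_reduce at hLast2 hHead2
      simp only [return_possible_moves, return_possible_moves_alt, hP,
        PySem.List.sorted_eq_foldl_insertBy, List.foldl_append, List.foldl_cons, List.foldl_nil,
        ← PySem.List.foldl_if_eq_foldl_filter,
        PySem.List.foldl_prod_mk (f := pvStepRow position r) (g := pvStepCol f r)]
      simp only [show ∀ x : String, (PySem.Str.pyGet? x 1).getD ' ' = pvKey1 x from fun _ => rfl]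
      rw [show pvStepRow position r = _ from funext fun s => funext fun c => pvStepRow_eq position r s c,
        show pvStepCol f r = _ from funext fun s => funext fun c => pvStepCol_eq f r s c]
      simp only [hMr, hMc]
      rw [pv_index_val position P1 S1 hpP1, pv_index_val position P2 S2 hpP2]
      simp only [Option.getD_some]
      rw [pv_chunk_eval position P1 S1, pv_chunk_eval position P2 S2,
        hLast1, hHead1, hLast2, hHead2]
      simp [List.append_assoc]
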